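-- pv_equiv track=rewrite | github.com/liz1czapla3955/csvwrangler | csvwrangler/schema_inferrer.py | _resolve_types
-- ===== SOURCE A (Python) =====
-- from typing import Dict, List, Optional
--
-- def _resolve_types(types: List[str]) -> str:
--     """Resolve a list of observed types into a single inferred type."""
--     type_set = set(t for t in types if t != 'empty')
--     if not type_set:
--         return 'string'
--     if len(type_set) == 1:
--         return type_set.pop()
--     if type_set <= {'integer', 'float'}:
--         return 'float'
--     return 'string'
-- ===== SOURCE B (Python) =====
-- from typing import Dict, List, Optional
--
-- def _resolve_types(types: List[str]) -> str:
--     """Single pass with scalar accumulators instead of building a set."""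
--     first = None
--     mixed = False
--     all_numeric = True
--     for t in types:
--         if t == 'empty':
--             continue
--         if first is None:
--             first = t
--             all_numeric = t in ('integer', 'float')
--         else:
--             if t != first:
--                 mixed = True
--             all_numeric = all_numeric and t in ('integer', 'float')
--     if first is None:
--         return 'string'
--     if not mixed:
--         return first
--     return 'float' if all_numeric else 'string'
-- ===== Notes on version B (the rewrite author's own statement) =====
-- stated objective: simpler
-- what changed: Replaced building a set of non-empty types and querying it (emptiness, len==1, subset of {integer,float}) by a single pass over types that threads three scalar accumulators (first non-empty type, mixed flag, all-numeric flag) and decides the result from them.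
import Mathlib
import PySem

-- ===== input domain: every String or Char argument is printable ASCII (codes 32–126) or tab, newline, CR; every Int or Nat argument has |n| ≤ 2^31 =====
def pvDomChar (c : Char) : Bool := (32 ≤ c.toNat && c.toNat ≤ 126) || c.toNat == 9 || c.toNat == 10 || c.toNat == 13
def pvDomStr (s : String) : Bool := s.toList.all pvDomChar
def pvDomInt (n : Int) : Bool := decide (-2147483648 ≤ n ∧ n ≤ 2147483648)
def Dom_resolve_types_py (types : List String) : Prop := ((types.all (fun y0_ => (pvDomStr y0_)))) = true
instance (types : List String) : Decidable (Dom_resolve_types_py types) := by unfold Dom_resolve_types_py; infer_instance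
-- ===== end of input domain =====

-- B replaces A's set construction plus len/subset queries by one pass carrying three scalars (first, mixed, all_numeric); objective: simpler.

-- ===== PORT A =====
-- set(t for t in types if t != 'empty'); `type_set.pop()` on a one-element set returns its sole element (ported as headD).
def resolve_types_py (types : List String) : String :=
  let type_set : PySem.Set String := PySem.Set.ofList (types.filter (fun t => t != "empty"))
  if type_set = [] then "string"
  else if PySem.Set.len type_set = 1 then type_set.headD ""
  else if PySem.Set.issubset type_set (PySem.Set.ofList ["integer", "float"]) then "float"
  else "string"

-- ===== PORT B =====
def pvIsNumeric (t : String) : Bool := t == "integer" || t == "float"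

def pvStep (st : Option String × Bool × Bool) (t : String) : Option String × Bool × Bool :=
  if t == "empty" then st
  else
    match st with
    | (none, _, _) => (some t, false, pvIsNumeric t)
    | (some f, mixed, alln) => (some f, mixed || t != f, alln && pvIsNumeric t)

def resolve_types_py_alt (types : List String) : String :=
  match types.foldl pvStep (none, false, true) with
  | (none, _, _) => "string"
  | (some f, mixed, alln) => if !mixed then f else if alln then "float" else "string"

-- ===== PRECONDITION & SPEC =====
def Spec_resolve_types_py (types : List String) (out : String) : Prop := out = resolve_types_py_alt types
instance (types : List String) (out : String) : Decidable (Spec_resolve_types_py types out) := by unfold Spec_resolve_types_py; infer_instance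

-- ===== CLAIM (what is proved, stated in full; the proofs are below) =====
def Claim_equal_resolve_types_py : Prop := ∀ (types : List String), Dom_resolve_types_py types → Spec_resolve_types_py types (resolve_types_py types)

-- ===== LEMMAS AND PROOFS =====

-- the abstract state B maintains, read off the deduplicated list (the set A builds)
def pvStateOf (s : List String) : Option String × Bool × Bool :=
  match s with
  | [] => (none, false, true)
  | f :: rest => (some f, decide (rest ≠ []), (f :: rest).all pvIsNumeric)

lemma pvAll_absorb (s : List String) (t : String) (ht : t ∈ s) :
    (s.all pvIsNumeric && pvIsNumeric t) = s.all pvIsNumeric := by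
  by_cases h : s.all pvIsNumeric = true
  · simp [h, List.all_eq_true.mp h t ht]
  · simp [Bool.eq_false_iff.mpr h]

lemma pvStep_stateOf (s : PySem.Set String) (t : String) :
    pvStep (pvStateOf s) t =
      pvStateOf (if t != "empty" then PySem.Set.add s t else s) := by
  by_cases he : t = "empty"
  · simp [pvStep, he]
  · have hne : ¬ ((t == "empty") = true) := by simpa using he
    rw [if_pos (by simpa using he)]
    by_cases hm : t ∈ s
    · have hadd : PySem.Set.add s t = s := by
        simp [PySem.Set.add, PySem.Set.contains, hm]
      rw [hadd]
      match s, hm with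
      | f :: rest, hm =>
        have h2 : (decide (rest ≠ []) || (t != f)) = decide (rest ≠ []) := by
          by_cases htf : t = f
          · simp [htf]
          · have htr : t ∈ rest := by
              rcases List.mem_cons.mp hm with h | h
              · exact absurd h htf
              · exact h
            have hre : rest ≠ [] := by intro h; simp [h] at htr
            simp [hre]
        have h3 := pvAll_absorb (f :: rest) t hm
        simp only [pvStep, pvStateOf, if_neg hne]
        rw [h2, h3]
    · have hadd : PySem.Set.add s t = s ++ [t] := by
        simp [PySem.Set.add, PySem.Set.contains, hm]
      rw [hadd]
      match s with
      | [] => simp [pvStep, pvStateOf, he]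
      | f :: rest =>
        have htf : t ≠ f := fun h => hm (h ▸ List.mem_cons_self)
        simp only [pvStep, pvStateOf, if_neg hne, List.cons_append]
        simp [htf, List.all_append, Bool.and_assoc]

lemma pvFold_eq (types : List String) (s : PySem.Set String) :
    types.foldl pvStep (pvStateOf s) =
      pvStateOf (types.foldl (fun s t => if t != "empty" then PySem.Set.add s t else s) s) := by
  induction types generalizing s with
  | nil => rfl
  | cons t rest ih =>
    simp only [List.foldl_cons, pvStep_stateOf]
    exact ih _

lemma pvFilter_foldl (types : List String) (s : PySem.Set String) :
    (types.filter (fun t => t != "empty")).foldl PySem.Set.add s =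
      types.foldl (fun s t => if t != "empty" then PySem.Set.add s t else s) s := by
  induction types generalizing s with
  | nil => rfl
  | cons t rest ih =>
    by_cases h : t = "empty"
    · simpa [h] using ih s
    · have hb : (t != "empty") = true := by simpa using h
      simp only [List.filter_cons, hb, if_true, List.foldl_cons]
      exact ih _

lemma pvSet_eq (types : List String) :
    PySem.Set.ofList (types.filter (fun t => t != "empty")) =
      types.foldl (fun s t => if t != "empty" then PySem.Set.add s t else s) ([] : PySem.Set String) := by
  rw [PySem.Set.ofList_eq_foldl]
  exact pvFilter_foldl types []

lemma pvContains_pair (x : String) :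
    (PySem.Set.ofList ["integer", "float"]).contains x = pvIsNumeric x := by
  have h : PySem.Set.ofList ["integer", "float"] = ["integer", "float"] := by decide
  rw [h]
  show List.contains ["integer", "float"] x = pvIsNumeric x
  simp only [pvIsNumeric, List.contains_cons, List.contains_nil, Bool.or_false]

lemma pvSubset_all (s : List String) :
    PySem.Set.issubset s (PySem.Set.ofList ["integer", "float"]) = s.all pvIsNumeric := by
  induction s with
  | nil => rfl
  | cons x rest ih =>
    simp only [PySem.Set.issubset, List.all_cons] at *
    rw [pvContains_pair, ih]

-- ===== VERDICT (by name: the statement is the Claim_ definition above) =====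
theorem resolve_types_py_spec : Claim_equal_resolve_types_py := by
  intro types _
  unfold Spec_resolve_types_py resolve_types_py resolve_types_py_alt
  rw [show ((none, false, true) : Option String × Bool × Bool) = pvStateOf [] from rfl,
    pvFold_eq, pvSet_eq]
  generalize types.foldl (fun s t => if t != "empty" then PySem.Set.add s t else s) ([] : PySem.Set String) = s
  match s with
  | [] => rfl
  | [f] => simp [pvStateOf, PySem.Set.len]
  | f :: g :: rest =>
    have h0 : (f :: g :: rest : PySem.Set String) ≠ [] := by simp
    have hlen : ¬ PySem.Set.len (f :: g :: rest) = 1 := by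
      simp [PySem.Set.len]
      omega
    rw [if_neg h0, if_neg hlen, pvSubset_all]
    simp only [pvStateOf]
    simp
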